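-- pv_equiv track=rewrite | github.com/AlanDeveloper/Algoritmos_E_Estruturas_De_Dados_II | Tarefa 1/grafo.py | transformEdgeInBoolean
-- ===== SOURCE A (Python) =====
-- def transformEdgeInBoolean(vertices, edge):
-- 	edgeBoolean = []
--
-- 	for i in range(0, len(vertices)):
-- 		append = False
--
-- 		for e in edge:
-- 			if int(vertices[i]) == int(e): append = True
--
-- 		if append:
-- 			edgeBoolean.append(1)
-- 		else:
-- 			edgeBoolean.append(0)
--
-- 	return edgeBoolean
-- ===== SOURCE B (Python) =====
-- def transformEdgeInBoolean(vertices, edge):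
--     index = {}
--     for i, v in enumerate(vertices):
--         key = int(v)
--         index[key] = index.get(key, []) + [i]
--     result = [0] * len(vertices)
--     for e in edge:
--         for i in index.get(int(e), []):
--             result[i] = 1
--     return result
-- ===== Notes on version B (the rewrite author's own statement) =====
-- stated objective: faster
-- what changed: Replaces A's nested scan (for every vertex, scan the whole edge list) by a value-to-indices dictionary built in one pass over the vertices, then a single pass over the edges marking a preallocated 0/1 result list in place.
import Mathlib
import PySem

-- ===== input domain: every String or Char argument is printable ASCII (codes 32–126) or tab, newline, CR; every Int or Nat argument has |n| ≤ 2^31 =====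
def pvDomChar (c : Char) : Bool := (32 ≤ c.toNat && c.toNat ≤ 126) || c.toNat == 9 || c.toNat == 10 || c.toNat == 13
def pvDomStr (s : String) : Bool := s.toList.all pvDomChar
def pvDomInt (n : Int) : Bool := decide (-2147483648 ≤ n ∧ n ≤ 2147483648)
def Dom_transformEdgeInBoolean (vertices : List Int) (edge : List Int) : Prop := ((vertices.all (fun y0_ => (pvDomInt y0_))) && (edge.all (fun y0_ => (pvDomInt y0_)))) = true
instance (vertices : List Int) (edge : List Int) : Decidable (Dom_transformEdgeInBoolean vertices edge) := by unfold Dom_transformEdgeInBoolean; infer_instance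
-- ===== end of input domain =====

-- B replaces A's quadratic nested scan by a value→indices dictionary built once, then one pass
-- over the edges marking a preallocated 0/1 result in place (objective: faster).

-- ===== PORT A =====
-- for i in range(0, len(vertices)): inner flag loop over edge, then append 1/0.
-- int(x) on an int is the identity; vertices[i] is always in range here, so the
-- pyGet? option is unwrapped with getD 0 (never taken).
def transformEdgeInBoolean (vertices : List Int) (edge : List Int) : List Int :=
  (PySem.List.pyRange 0 vertices.length 1).foldl
    (fun acc i =>
      let v := (PySem.List.pyGet? vertices i).getD 0
      let append := edge.foldl (fun a e => if v = e then true else a) false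
      acc ++ [if append then (1 : Int) else 0])
    []

-- ===== PORT B =====
-- index[key] = index.get(key, []) + [i]  ≙  Dict.modify key [] (· ++ [i]);
-- result[i] = 1  ≙  List.set i.toNat 1 (enumerate indices are ≥ 0, so toNat is exact).
def transformEdgeInBoolean_alt (vertices : List Int) (edge : List Int) : List Int :=
  let index : PySem.Dict Int (List Int) :=
    (PySem.List.enumerate vertices).foldl
      (fun d p => d.modify p.2 [] (· ++ [p.1])) PySem.Dict.empty
  let result := List.replicate vertices.length (0 : Int)
  edge.foldl (fun r e => (index.getD e []).foldl (fun r i => r.set i.toNat 1) r) result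

-- ===== PRECONDITION & SPEC =====
def Spec_transformEdgeInBoolean (vertices : List Int) (edge : List Int) (out : List Int) : Prop := out = transformEdgeInBoolean_alt vertices edge
instance (vertices : List Int) (edge : List Int) (out : List Int) : Decidable (Spec_transformEdgeInBoolean vertices edge out) := by unfold Spec_transformEdgeInBoolean; infer_instance

-- ===== CLAIM (what is proved, stated in full; the proofs are below) =====
def Claim_equal_transformEdgeInBoolean : Prop := ∀ (vertices : List Int) (edge : List Int), Dom_transformEdgeInBoolean vertices edge → Spec_transformEdgeInBoolean vertices edge (transformEdgeInBoolean vertices edge)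

-- ===== LEMMAS AND PROOFS =====

-- A's inner flag loop is a membership test over the edge list.
theorem pv_flag_fold (v : Int) (edge : List Int) (b : Bool) :
    edge.foldl (fun a e => if v = e then true else a) b = (b || decide (v ∈ edge)) := by
  induction edge generalizing b with
  | nil => simp
  | cons e es ih =>
    simp only [List.foldl_cons, ih]
    by_cases h : v = e <;> simp [h]

-- A in map form.
theorem pv_A_eq_map (vertices edge : List Int) :
    transformEdgeInBoolean vertices edge
      = (List.range vertices.length).map
          (fun k => if vertices[k]?.getD 0 ∈ edge then (1 : Int) else 0) := by
  unfold transformEdgeInBoolean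
  rw [PySem.List.pyRange_zero_natCast, List.foldl_map,
      PySem.List.foldl_append_singleton_eq_map]
  refine List.map_congr_left (fun k _ => ?_)
  rw [pv_flag_fold]
  simp [PySem.List.pyGet?_natCast]

-- the marking loop, pointwise
theorem pv_mark_length (idxs : List Int) (r : List Int) :
    (idxs.foldl (fun r i => r.set i.toNat 1) r).length = r.length := by
  induction idxs generalizing r with
  | nil => rfl
  | cons i is ih => simp [ih]

theorem pv_mark_get? (idxs : List Int) (r : List Int) (j : Nat) :
    (idxs.foldl (fun r i => r.set i.toNat 1) r)[j]?
      = if idxs.any (fun i => i.toNat == j) then (if j < r.length then some 1 else none)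
        else r[j]? := by
  induction idxs generalizing r with
  | nil => simp
  | cons i is ih =>
    simp only [List.foldl_cons, ih, List.length_set, List.any_cons]
    by_cases hi : i.toNat = j
    · subst hi
      by_cases hj : i.toNat < r.length
      · simp [hj]
      · have h1 : (r.set i.toNat 1)[i.toNat]? = r[i.toNat]? := by
          rw [List.getElem?_set]; simp [hj]
        simp [hj]
    · have h1 : (r.set i.toNat 1)[j]? = r[j]? := by
        rw [List.getElem?_set]; simp [hi]
      simp [h1, hi]

-- the outer edge loop, pointwise
theorem pv_outer_get? (idx : Int → List Int) (edge : List Int) (r : List Int) (j : Nat) :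
    (edge.foldl (fun r e => (idx e).foldl (fun r i => r.set i.toNat 1) r) r)[j]?
      = if edge.any (fun e => (idx e).any (fun i => i.toNat == j))
          then (if j < r.length then some 1 else none)
        else r[j]? := by
  induction edge generalizing r with
  | nil => simp
  | cons e es ih =>
    simp only [List.foldl_cons, ih, pv_mark_length, List.any_cons, pv_mark_get?]
    by_cases h1 : (idx e).any (fun i => i.toNat == j) <;>
      by_cases h2 : es.any (fun e => (idx e).any (fun i => i.toNat == j)) <;>
      simp [h1, h2]

-- the dictionary's bucket at e lists exactly the indices whose vertex equals e
theorem pv_index_getD (vertices : List Int) (e : Int) :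
    (((PySem.List.enumerate vertices).foldl
        (fun d p => d.modify p.2 [] (· ++ [p.1]))
        (PySem.Dict.empty : PySem.Dict Int (List Int))).getD e [])
      = (((PySem.List.enumerate vertices).map Prod.swap).filter (fun p => p.1 == e)).map (·.2) := by
  have h : (PySem.List.enumerate vertices).foldl
        (fun d p => d.modify p.2 [] (· ++ [p.1]))
        (PySem.Dict.empty : PySem.Dict Int (List Int))
      = ((PySem.List.enumerate vertices).map Prod.swap).foldl
        (fun d p => d.modify p.1 [] (· ++ [p.2])) PySem.Dict.empty := by
    rw [List.foldl_map]; rfl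
  rw [h, PySem.Dict.getD_foldl_modify_append]
  simp

-- bucket membership test, as the vertex condition
theorem pv_bucket_any (vertices : List Int) (e : Int) (j : Nat) :
    (((((PySem.List.enumerate vertices).map Prod.swap).filter (fun p => p.1 == e)).map (·.2)).any
        (fun i => i.toNat == j)) = true
      ↔ (j < vertices.length ∧ vertices[j]?.getD 0 = e) := by
  simp only [List.any_map, List.any_filter, List.any_eq_true,
    PySem.List.mem_enumerate_iff, Function.comp]
  constructor
  · rintro ⟨p, ⟨k, hk, rfl⟩, hcond⟩
    simp only [Prod.swap_prod_mk, Bool.and_eq_true, beq_iff_eq] at hcond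
    obtain ⟨he, hij⟩ := hcond
    have hkj : k = j := by simpa using hij
    subst hkj
    exact ⟨hk, by simp [List.getElem?_eq_getElem hk, he]⟩
  · rintro ⟨hj, he⟩
    refine ⟨((j : Int), vertices[j]), ⟨j, hj, by simp⟩, ?_⟩
    have he' : vertices[j] = e := by simpa [List.getElem?_eq_getElem hj] using he
    simp [he']
-- the whole marking condition at position j
theorem pv_cond (vertices edge : List Int) (j : Nat) :
    (edge.any (fun e =>
        (((((PySem.List.enumerate vertices).map Prod.swap).filter (fun p => p.1 == e)).map (·.2)).any
          (fun i => i.toNat == j)))) = true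
      ↔ (j < vertices.length ∧ vertices[j]?.getD 0 ∈ edge) := by
  rw [List.any_eq_true]
  constructor
  · rintro ⟨e, he, hb⟩
    obtain ⟨hj, hv⟩ := (pv_bucket_any vertices e j).mp hb
    exact ⟨hj, hv ▸ he⟩
  · rintro ⟨hj, hmem⟩
    exact ⟨_, hmem, (pv_bucket_any vertices _ j).mpr ⟨hj, rfl⟩⟩

-- ===== VERDICT (by name: the statement is the Claim_ definition above) =====
theorem transformEdgeInBoolean_spec : Claim_equal_transformEdgeInBoolean := by
  intro vertices edge _
  unfold Spec_transformEdgeInBoolean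
  rw [pv_A_eq_map]
  unfold transformEdgeInBoolean_alt
  apply List.ext_getElem?
  intro j
  rw [pv_outer_get?]
  simp only [pv_index_getD, List.length_replicate]
  rcases Nat.lt_or_ge j vertices.length with hj | hj
  · have hL : ((List.range vertices.length).map
        (fun k => if vertices[k]?.getD 0 ∈ edge then (1 : Int) else 0))[j]?
        = some (if vertices[j]?.getD 0 ∈ edge then (1 : Int) else 0) := by
      simp [List.getElem?_map, List.getElem?_range hj]
    by_cases hm : vertices[j]?.getD 0 ∈ edge
    · have hc := (pv_cond vertices edge j).mpr ⟨hj, hm⟩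
      have hm' : vertices[j] ∈ edge := by simpa [List.getElem?_eq_getElem hj] using hm
      rw [hL, hc]
      simp [hj, hm']
    · have hc : (edge.any (fun e =>
          (((((PySem.List.enumerate vertices).map Prod.swap).filter (fun p => p.1 == e)).map (·.2)).any
            (fun i => i.toNat == j)))) = false := by
        rw [Bool.eq_false_iff]
        intro hcontra
        exact hm ((pv_cond vertices edge j).mp hcontra).2
      have hm' : vertices[j] ∉ edge := by simpa [List.getElem?_eq_getElem hj] using hm
      rw [hL, hc]
      simp [hm', List.getElem?_replicate, hj]
  · have hc : (edge.any (fun e =>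
        (((((PySem.List.enumerate vertices).map Prod.swap).filter (fun p => p.1 == e)).map (·.2)).any
          (fun i => i.toNat == j)))) = false := by
      rw [Bool.eq_false_iff]
      intro hcontra
      exact absurd ((pv_cond vertices edge j).mp hcontra).1 (Nat.not_lt.mpr hj)
    rw [hc]
    have hn : ¬ j < vertices.length := Nat.not_lt.mpr hj
    simp [List.getElem?_eq_none, hj, hn]
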